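-- pv_equiv track=rewrite | github.com/Geoff-/Python_Proj | Old.py | parseUrll
-- ===== SOURCE A (Python) =====
-- def parseUrll(source):
--     string = []
--     source = str(source)
--     ignoreNext = False
--     for i in range(len(source)):
--         if str(source[i]) == '\\' and not ignoreNext:
--             if str(source[i+1]) == 'n':
--                 string.append('\n')
--                 ignoreNext = True
--             elif str(source[i+1]) == 't':
--                 string.append('\t')
--                 ignoreNext = True
--             elif str(source[i+1]) == '\'':
--                 string.append('\'')
--                 ignoreNext = True
--             elif str(source[i+1]) == 'r':
--                 string.append('\r')
--                 ignoreNext = True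
--             else:
--                 string.append("\\")
--                 ignoreNext = False
--         elif not ignoreNext:
--             string.append(str(source[i]))
--             ignoreNext = False
--         else:
--             ignoreNext = False
--     return "".join(string)
-- ===== SOURCE B (Python) =====
-- _ESC = {'n': '\n', 't': '\t', "'": "'", 'r': '\r'}
--
-- def parseUrll(source):
--     source = str(source)
--     first, *rest = source.split('\\')
--     pieces = [first]
--     for p in rest:
--         # each p follows one backslash in the source
--         if p and p[0] in _ESC:
--             pieces.append(_ESC[p[0]] + p[1:])
--         else:
--             pieces.append('\\' + p)
--     return ''.join(pieces)
-- ===== Notes on version B (the rewrite author's own statement) =====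
-- stated objective: faster
-- what changed: Instead of a character-by-character scan carrying a skip flag, B splits the string on backslashes in one library call and then expands each post-backslash segment by rewriting only its first character, joining the segments at the end; the per-character Python loop work shrinks to one pass over the (usually few) segments.
import Mathlib
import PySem

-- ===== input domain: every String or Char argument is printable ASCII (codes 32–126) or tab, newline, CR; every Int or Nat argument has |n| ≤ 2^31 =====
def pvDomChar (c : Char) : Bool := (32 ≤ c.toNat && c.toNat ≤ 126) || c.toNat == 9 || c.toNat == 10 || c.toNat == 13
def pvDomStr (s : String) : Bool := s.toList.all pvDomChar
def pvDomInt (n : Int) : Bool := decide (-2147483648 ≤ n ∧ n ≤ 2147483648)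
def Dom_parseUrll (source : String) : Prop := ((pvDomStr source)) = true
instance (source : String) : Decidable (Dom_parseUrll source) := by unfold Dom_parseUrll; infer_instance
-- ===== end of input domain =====

-- B replaces A's flag-carrying character scan by split-on-backslash + per-segment
-- first-character rewriting + join (objective: faster; measured faster in a timing run).


-- ===== PORT A =====
-- A's for-loop over indices with the ignoreNext flag, as structural recursion over
-- the character list carrying the flag; source[i+1] is the head of the rest.
-- On a trailing backslash Python raises IndexError (excluded by Pre_); the port
-- returns the pieces collected so far there.
def parseUrllGoA : List Char → Bool → List Char
  | [], _ => []
  | c :: rest, ign =>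
    if c = '\\' ∧ ign = false then
      match rest.head? with
      | some d =>
        if d = 'n' then '\n' :: parseUrllGoA rest true
        else if d = 't' then '\t' :: parseUrllGoA rest true
        else if d = '\'' then '\'' :: parseUrllGoA rest true
        else if d = 'r' then '\r' :: parseUrllGoA rest true
        else '\\' :: parseUrllGoA rest false
      | none => []  -- Python: IndexError (outside Pre_)
    else if ign = false then c :: parseUrllGoA rest false
    else parseUrllGoA rest false

def parseUrll (source : String) : String := String.ofList (parseUrllGoA source.toList false)

-- ===== PORT B =====
def pvEscapes : PySem.Dict Char Char := PySem.Dict.mk [('n', '\n'), ('t', '\t'), ('\'', '\''), ('r', '\r')]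

-- hand port of Python str.split('\\') (exact for a single-character separator):
-- the list of maximal backslash-free segments, with an empty segment between,
-- before and after adjacent/leading/trailing backslashes.
def pvSplitBS : List Char → List (List Char)
  | [] => [[]]
  | c :: cs =>
    if c = '\\' then [] :: pvSplitBS cs
    else
      match pvSplitBS cs with
      | p :: t => (c :: p) :: t
      | [] => [[c]]  -- unreachable: pvSplitBS never returns []

-- Source B's loop body: expand one post-backslash segment
def pvPart (p : List Char) : List Char :=
  match p with
  | d :: ds =>
    match PySem.Dict.get? pvEscapes d with
    | some v => v :: ds
    | none => '\\' :: d :: ds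
  | [] => ['\\']

def parseUrll_alt (source : String) : String :=
  String.ofList
    ((pvSplitBS source.toList).headD [] ++ ((pvSplitBS source.toList).tail).flatMap pvPart)

-- ===== PRECONDITION & SPEC =====
-- Pre_ excludes strings ending in a backslash: there the Python A raises IndexError.
def Pre_parseUrll (source : String) : Prop := source.toList.getLast? ≠ some '\\'
instance (source : String) : Decidable (Pre_parseUrll source) := by unfold Pre_parseUrll; infer_instance
def pvWitness_parseUrll : String := "a\\nb\\q"
def Spec_parseUrll (source : String) (out : String) : Prop := out = parseUrll_alt source
instance (source : String) (out : String) : Decidable (Spec_parseUrll source out) := by unfold Spec_parseUrll; infer_instance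

-- ===== CLAIM (what is proved, stated in full; the proofs are below) =====
def Claim_equal_parseUrll : Prop := ∀ (source : String), Dom_parseUrll source → Pre_parseUrll source → Spec_parseUrll source (parseUrll source)

-- ===== LEMMAS AND PROOFS =====
theorem pvSplitBS_ne_nil : ∀ cs : List Char, pvSplitBS cs ≠ []
  | [] => by simp [pvSplitBS]
  | c :: cs => by
    unfold pvSplitBS
    split_ifs
    · simp
    · cases h : pvSplitBS cs <;> simp

-- B's result on a character list
def pvGoB (cs : List Char) : List Char :=
  (pvSplitBS cs).headD [] ++ ((pvSplitBS cs).tail).flatMap pvPart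

theorem pvSplitBS_cons_ne (c : Char) (cs : List Char) (h : c ≠ '\\') :
    pvSplitBS (c :: cs) = (c :: (pvSplitBS cs).headD []) :: (pvSplitBS cs).tail := by
  cases hs : pvSplitBS cs with
  | nil => exact absurd hs (pvSplitBS_ne_nil cs)
  | cons p t =>
    conv_lhs => rw [pvSplitBS]
    rw [if_neg h, hs]
    simp

theorem pvGoB_cons_ne (c : Char) (cs : List Char) (h : c ≠ '\\') :
    pvGoB (c :: cs) = c :: pvGoB cs := by
  simp [pvGoB, pvSplitBS_cons_ne c cs h]

theorem pvGoB_bs (cs : List Char) :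
    pvGoB ('\\' :: cs) = pvPart ((pvSplitBS cs).headD []) ++ ((pvSplitBS cs).tail).flatMap pvPart := by
  have : pvSplitBS ('\\' :: cs) = [] :: pvSplitBS cs := by simp [pvSplitBS]
  cases hs : pvSplitBS cs with
  | nil => exact absurd hs (pvSplitBS_ne_nil cs)
  | cons p t => simp [pvGoB, this, hs]

theorem pvEsc_none (d : Char) (hn : d ≠ 'n') (ht : d ≠ 't') (hq : d ≠ '\'') (hr : d ≠ 'r') :
    PySem.Dict.get? pvEscapes d = none := by
  simp [pvEscapes, PySem.Dict.get?, beq_eq_false_iff_ne.mpr (Ne.symm hn),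
    beq_eq_false_iff_ne.mpr (Ne.symm ht), beq_eq_false_iff_ne.mpr (Ne.symm hq),
    beq_eq_false_iff_ne.mpr (Ne.symm hr)]

-- escape case: B translates the first char of the next segment
theorem pvGoB_bs_esc (d : Char) (v : Char) (cs : List Char)
    (h : PySem.Dict.get? pvEscapes d = some v) :
    pvGoB ('\\' :: d :: cs) = v :: pvGoB cs := by
  have hd : d ≠ '\\' := by
    intro e; subst e
    simp [pvEscapes, PySem.Dict.get?] at h
  rw [pvGoB_bs, pvSplitBS_cons_ne d cs hd]
  simp [pvPart, h, pvGoB]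

-- non-escape case: B keeps the backslash and re-emits the segment
theorem pvGoB_bs_noesc (d : Char) (cs : List Char)
    (h : PySem.Dict.get? pvEscapes d = none) :
    pvGoB ('\\' :: d :: cs) = '\\' :: pvGoB (d :: cs) := by
  by_cases hd : d = '\\'
  · subst hd
    rw [pvGoB_bs]
    have : pvSplitBS ('\\' :: cs) = [] :: pvSplitBS cs := by simp [pvSplitBS]
    simp [this, pvPart, pvGoB]
  · rw [pvGoB_bs, pvSplitBS_cons_ne d cs hd]
    simp [pvPart, h, pvGoB, pvSplitBS_cons_ne d cs hd]

theorem pvGoA_skip (c : Char) (cs : List Char) :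
    parseUrllGoA (c :: cs) true = parseUrllGoA cs false := by
  simp [parseUrllGoA]

theorem pvGo_eq : ∀ cs : List Char, cs.getLast? ≠ some '\\' →
    parseUrllGoA cs false = pvGoB cs
  | [], _ => by simp [parseUrllGoA, pvGoB, pvSplitBS]
  | [c], h => by
    have hc : c ≠ '\\' := fun e => h (by simp [e])
    rw [show parseUrllGoA [c] false = [c] from by simp [parseUrllGoA, hc],
      pvGoB_cons_ne c [] hc]
    simp [pvGoB, pvSplitBS]
  | c :: d :: rest, h => by
    have hrest : (d :: rest).getLast? ≠ some '\\' := by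
      rwa [List.getLast?_cons_cons] at h
    have hr' : rest.getLast? ≠ some '\\' := by
      cases rest with
      | nil => simp
      | cons x xs => rwa [List.getLast?_cons_cons] at hrest
    by_cases hc : c = '\\'
    · subst hc
      by_cases hn : d = 'n'
      · subst hn
        rw [show parseUrllGoA ('\\' :: 'n' :: rest) false
              = '\n' :: parseUrllGoA ('n' :: rest) true from by simp [parseUrllGoA],
          pvGoA_skip,
          pvGoB_bs_esc 'n' '\n' rest (by simp [pvEscapes, PySem.Dict.get?_mk_cons]),
          pvGo_eq rest hr']
      · by_cases ht : d = 't'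
        · subst ht
          rw [show parseUrllGoA ('\\' :: 't' :: rest) false
                = '\t' :: parseUrllGoA ('t' :: rest) true from by simp [parseUrllGoA],
            pvGoA_skip,
            pvGoB_bs_esc 't' '\t' rest (by simp [pvEscapes, PySem.Dict.get?_mk_cons]),
            pvGo_eq rest hr']
        · by_cases hq : d = '\''
          · subst hq
            rw [show parseUrllGoA ('\\' :: '\'' :: rest) false
                  = '\'' :: parseUrllGoA ('\'' :: rest) true from by simp [parseUrllGoA],
              pvGoA_skip,
              pvGoB_bs_esc '\'' '\'' rest (by simp [pvEscapes, PySem.Dict.get?_mk_cons]),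
              pvGo_eq rest hr']
          · by_cases hr : d = 'r'
            · subst hr
              rw [show parseUrllGoA ('\\' :: 'r' :: rest) false
                    = '\r' :: parseUrllGoA ('r' :: rest) true from by simp [parseUrllGoA],
                pvGoA_skip,
                pvGoB_bs_esc 'r' '\r' rest (by simp [pvEscapes, PySem.Dict.get?_mk_cons]),
                pvGo_eq rest hr']
            · rw [show parseUrllGoA ('\\' :: d :: rest) false
                    = '\\' :: parseUrllGoA (d :: rest) false from by
                  simp [parseUrllGoA, hn, ht, hq, hr],
                pvGoB_bs_noesc d rest (pvEsc_none d hn ht hq hr),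
                pvGo_eq (d :: rest) hrest]
    · rw [show parseUrllGoA (c :: d :: rest) false
            = c :: parseUrllGoA (d :: rest) false from by simp [parseUrllGoA, hc],
        pvGoB_cons_ne c (d :: rest) hc, pvGo_eq (d :: rest) hrest]
  termination_by cs => cs.length
  decreasing_by all_goals simp

-- ===== VERDICT (by name: the statement is the Claim_ definition above) =====
theorem parseUrll_spec : Claim_equal_parseUrll := by
  intro source _ hpre
  unfold Spec_parseUrll parseUrll parseUrll_alt
  rw [pvGo_eq source.toList hpre]
  rfl
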